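-- pv_equiv track=rewrite | github.com/Migorithm/Algorithm | Algorithm_83_test3.py | solution
-- ===== SOURCE A (Python) =====
-- def solution(candles):
--     days = 0
--
--     for i in range(1,len(candles)+1):
--         candles.sort(reverse=True)
--         #lengh check
--         candidates = list(filter(lambda x : x>=1,candles))
--
--         #number check
--         if len(candidates) >= i:
--             days+=1
--
--             # substracting numbers (-1)
--             for j in range(i):
--                 candles[j] -= 1
--         else:
--             break
--
--         #substracting numbers (-1)
--
--
--
--     return days
-- ===== SOURCE B (Python) =====
-- def solution(candles):
--     def merge_desc(xs, ys):
--         out = []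
--         a = b = 0
--         while a < len(xs) and b < len(ys):
--             if xs[a] >= ys[b]:
--                 out.append(xs[a]); a += 1
--             else:
--                 out.append(ys[b]); b += 1
--         out.extend(xs[a:])
--         out.extend(ys[b:])
--         return out
--
--     cur = sorted(candles, reverse=True)
--     days = 0
--     for i in range(1, len(cur) + 1):
--         pos = 0
--         while pos < len(cur) and cur[pos] >= 1:
--             pos += 1
--         if pos < i:
--             break
--         days += 1
--         cur = merge_desc([x - 1 for x in cur[:i]], cur[i:])
--     return days
-- ===== Notes on version B (the rewrite author's own statement) =====
-- stated objective: alternative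
-- what changed: B sorts the list once and then keeps it in descending order by merging the decremented prefix with the untouched suffix (a linear merge per day, and a takeWhile scan instead of a full filter), instead of A's full re-sort and filter of the whole list every day.
import Mathlib
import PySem

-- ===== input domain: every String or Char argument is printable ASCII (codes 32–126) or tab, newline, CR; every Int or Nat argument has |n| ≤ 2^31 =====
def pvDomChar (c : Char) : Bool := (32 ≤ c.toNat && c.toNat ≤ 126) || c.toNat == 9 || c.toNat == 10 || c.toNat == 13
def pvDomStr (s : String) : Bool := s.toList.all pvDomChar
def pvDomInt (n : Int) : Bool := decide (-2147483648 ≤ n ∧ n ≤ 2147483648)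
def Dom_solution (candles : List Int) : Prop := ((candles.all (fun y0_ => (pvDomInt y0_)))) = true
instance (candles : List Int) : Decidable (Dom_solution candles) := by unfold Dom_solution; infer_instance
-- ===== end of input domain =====

-- B sorts once and maintains the descending order by merging, instead of re-sorting every day
-- (objective: alternative). A mutates its argument in place (sorts and decrements it); the
-- equivalence proved here is about the return value only.

-- ===== PORT A =====
-- 'for j in range(i): candles[j] -= 1' (i ≤ len(candles) always holds in A)
def subOneA : Nat → List Int → List Int
  | 0, c => c
  | _ + 1, [] => []
  | n + 1, x :: xs => (x - 1) :: subOneA n xs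

-- the for-loop over i = 1 .. len(candles), with the break as stopping the recursion
def solutionGo : List Nat → List Int → Int → Int
  | [], _, days => days
  | i :: rest, candles, days =>
    let c := PySem.List.sorted candles (fun x => x) true
    let candidates := c.filter (fun x => decide (x ≥ 1))
    if candidates.length ≥ i then
      solutionGo rest (subOneA i c) (days + 1)
    else days

def solution (candles : List Int) : Int :=
  solutionGo (List.range' 1 candles.length) candles 0

-- ===== PORT B =====
-- merge_desc: merge of two descending lists
def mergeDesc : List Int → List Int → List Int
  | [], ys => ys
  | x :: xs, [] => x :: xs
  | x :: xs, y :: ys =>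
    if x ≥ y then x :: mergeDesc xs (y :: ys) else y :: mergeDesc (x :: xs) ys

-- the 'while pos < len(cur) and cur[pos] >= 1: pos += 1' scan
def posCount (c : List Int) : Nat := (c.takeWhile (fun x => decide (x ≥ 1))).length

def solutionAltGo : List Nat → List Int → Int → Int
  | [], _, days => days
  | i :: rest, cur, days =>
    if posCount cur < i then days
    else
      solutionAltGo rest (mergeDesc ((cur.take i).map (fun x => x - 1)) (cur.drop i)) (days + 1)

def solution_alt (candles : List Int) : Int :=
  solutionAltGo (List.range' 1 candles.length) (PySem.List.sorted candles (fun x => x) true) 0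

-- ===== PRECONDITION & SPEC =====
def Spec_solution (candles : List Int) (out : Int) : Prop := out = solution_alt candles
instance (candles : List Int) (out : Int) : Decidable (Spec_solution candles out) := by unfold Spec_solution; infer_instance

-- ===== CLAIM (what is proved, stated in full; the proofs are below) =====
def Claim_equal_solution : Prop := ∀ (candles : List Int), Dom_solution candles → Spec_solution candles (solution candles)

-- ===== LEMMAS AND PROOFS =====

-- sorted(xs, reverse=True) is the unique descending rearrangement of xs
theorem sorted_rev_eq_of_perm_of_pairwise_ge (xs ys : List Int)
    (hp : ys.Perm xs) (hs : ys.Pairwise (fun a b => b ≤ a)) :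
    PySem.List.sorted xs (fun x => x) true = ys := by
  exact List.Perm.eq_of_pairwise
    (fun a b _ _ h1 h2 => le_antisymm h2 h1)
    (PySem.List.sorted_pairwise_rev (xs := xs) (key := fun x => x)) hs
    ((PySem.List.sorted_perm (xs := xs) (key := fun x => x) (rev := true)).trans hp.symm)

theorem subOneA_eq (n : Nat) (xs : List Int) :
    subOneA n xs = (xs.take n).map (fun x => x - 1) ++ xs.drop n := by
  induction n generalizing xs with
  | zero => simp [subOneA]
  | succ n ih =>
    cases xs with
    | nil => simp [subOneA]
    | cons x xs => simp [subOneA, ih]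

theorem mergeDesc_perm (xs ys : List Int) : (mergeDesc xs ys).Perm (xs ++ ys) := by
  fun_induction mergeDesc xs ys with
  | case1 ys => simp
  | case2 x xs => simp
  | case3 x xs y ys h ih => simpa [mergeDesc, h] using ih.cons x
  | case4 x xs y ys h ih => exact (ih.cons y).trans List.perm_middle.symm

theorem mem_mergeDesc {z : Int} {xs ys : List Int} (h : z ∈ mergeDesc xs ys) :
    z ∈ xs ∨ z ∈ ys := by
  have := (mergeDesc_perm xs ys).mem_iff.mp h
  simpa using this

theorem mergeDesc_pairwise (xs ys : List Int)
    (hx : xs.Pairwise (fun a b => b ≤ a)) (hy : ys.Pairwise (fun a b => b ≤ a)) :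
    (mergeDesc xs ys).Pairwise (fun a b => b ≤ a) := by
  fun_induction mergeDesc xs ys with
  | case1 ys => simpa [mergeDesc] using hy
  | case2 x xs => simpa [mergeDesc] using hx
  | case3 x xs y ys h ih =>
    rcases List.pairwise_cons.mp hx with ⟨hxall, hxtail⟩
    rcases List.pairwise_cons.mp hy with ⟨hyall, hytail⟩
    refine List.pairwise_cons.mpr ⟨?_, ih hxtail hy⟩
    intro z hz
    rcases mem_mergeDesc hz with hzx | hzy
    · exact hxall z hzx
    · rcases List.mem_cons.mp hzy with rfl | hzy'
      · exact h
      · exact le_trans (hyall z hzy') h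
  | case4 x xs y ys h ih =>
    rcases List.pairwise_cons.mp hx with ⟨hxall, hxtail⟩
    rcases List.pairwise_cons.mp hy with ⟨hyall, hytail⟩
    have hxy : x ≤ y := le_of_lt (lt_of_not_ge h)
    refine List.pairwise_cons.mpr ⟨?_, ih hx hytail⟩
    intro z hz
    rcases mem_mergeDesc hz with hzx | hzy
    · rcases List.mem_cons.mp hzx with rfl | hzx'
      · exact hxy
      · exact le_trans (hxall z hzx') hxy
    · exact hyall z hzy

theorem filter_len_eq_takeWhile_len (c : List Int)
    (hs : c.Pairwise (fun a b => b ≤ a)) :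
    (c.filter (fun x => decide (x ≥ 1))).length = posCount c := by
  induction c with
  | nil => simp [posCount]
  | cons x xs ih =>
    rcases List.pairwise_cons.mp hs with ⟨hall, htail⟩
    by_cases h : x ≥ 1
    · simp only [posCount, List.takeWhile_cons, List.filter_cons, h, decide_true]
      simpa [posCount] using ih htail
    · have hfil : xs.filter (fun x => decide (x ≥ 1)) = [] := by
        rw [List.filter_eq_nil_iff]
        intro z hz
        simp only [decide_eq_true_eq]
        intro hz1
        exact h (le_trans hz1 (hall z hz))
      simp [posCount, h, hfil]

theorem go_eq (is : List Nat) (c cur : List Int) (days : Int)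
    (hperm : c.Perm cur) (hsort : cur.Pairwise (fun a b => b ≤ a)) :
    solutionGo is c days = solutionAltGo is cur days := by
  induction is generalizing c cur days with
  | nil => simp [solutionGo, solutionAltGo]
  | cons i rest ih =>
    have hcur : PySem.List.sorted c (fun x => x) true = cur :=
      sorted_rev_eq_of_perm_of_pairwise_ge c cur hperm.symm hsort
    have hcnt := filter_len_eq_takeWhile_len cur hsort
    simp only [solutionGo, solutionAltGo, hcur, hcnt]
    by_cases hlt : posCount cur < i
    · rw [if_neg (by omega), if_pos hlt]
    · rw [if_pos (by omega), if_neg hlt]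
      apply ih
      · rw [subOneA_eq]
        exact (mergeDesc_perm _ _).symm
      · refine mergeDesc_pairwise _ _ ?_ ?_
        · exact List.Pairwise.map _ (fun a b hab => by omega) hsort.take
        · exact hsort.drop

-- ===== VERDICT (by name: the statement is the Claim_ definition above) =====
theorem solution_spec : Claim_equal_solution := by
  intro candles _
  unfold Spec_solution solution solution_alt
  exact go_eq _ candles _ 0
    (PySem.List.sorted_perm (xs := candles) (key := fun x => x) (rev := true)).symm
    (PySem.List.sorted_pairwise_rev (xs := candles) (key := fun x => x))
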